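-- pv_equiv track=rewrite | github.com/LarisaOvchinnikova/python_codewars | The Baby Years III - First Tooth.py | first_tooth
-- ===== SOURCE A (Python) =====
-- def first_tooth(arr):
--     a = []
--     if len(arr) == 1: return 0
--     a.append(arr[0] - arr[1])
--     for i in range(1, len(arr)-1):
--         a.append(arr[i] - arr[i-1] + arr[i] - arr[i+1])
--     a.append(arr[-1] - arr[-2])
--     if len(set(a)) == 1: return -1
--     m = max(a)
--     return a.index(m) if a.count(m) == 1 else -1
-- ===== SOURCE B (Python) =====
-- def first_tooth(arr):
--     n = len(arr)
--     if n == 1: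
--         return 0
--     best = None
--     idx = -1
--     cnt = 0
--     for i in range(n):
--         if i == 0:
--             d = arr[0] - arr[1]
--         elif i == n - 1:
--             d = arr[n - 1] - arr[n - 2]
--         else:
--             d = 2 * arr[i] - arr[i - 1] - arr[i + 1]
--         if best is None or d > best:
--             best, idx, cnt = d, i, 1
--         elif d == best:
--             cnt += 1
--     return idx if cnt == 1 else -1
-- ===== Notes on version B (the rewrite author's own statement) =====
-- stated objective: simpler
-- what changed: Replaces A's build-a-difference-list-then-scan-it-four-times (set, max, index, count) with a single streaming pass over arr that computes each difference on the fly while tracking the best value, its first index and its multiplicity; the all-equal guard is subsumed by the uniqueness check.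
import Mathlib
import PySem

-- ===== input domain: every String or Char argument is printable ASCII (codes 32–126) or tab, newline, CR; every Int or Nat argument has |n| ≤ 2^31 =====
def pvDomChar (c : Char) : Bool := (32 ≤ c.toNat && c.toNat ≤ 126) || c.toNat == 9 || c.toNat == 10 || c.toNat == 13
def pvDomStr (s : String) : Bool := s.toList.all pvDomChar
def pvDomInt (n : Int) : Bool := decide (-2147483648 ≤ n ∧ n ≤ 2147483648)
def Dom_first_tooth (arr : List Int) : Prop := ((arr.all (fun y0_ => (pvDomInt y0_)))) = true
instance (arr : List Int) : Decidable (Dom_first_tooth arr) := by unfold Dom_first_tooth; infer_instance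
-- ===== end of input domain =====

-- B replaces A's intermediate difference list and its four scans (set/max/index/count) by one
-- streaming pass tracking (best, first index, multiplicity); objective: simpler.

-- ===== PORT A =====
def first_tooth (arr : List Int) : Int :=
  let n : Int := arr.length
  if n = 1 then 0
  else
    let a : List Int :=
      (PySem.List.pyRange 1 (n - 1) 1).foldl
        (fun acc i => acc ++ [PySem.List.pyGetD arr i 0 - PySem.List.pyGetD arr (i-1) 0
                              + PySem.List.pyGetD arr i 0 - PySem.List.pyGetD arr (i+1) 0])
        [PySem.List.pyGetD arr 0 0 - PySem.List.pyGetD arr 1 0]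
    let a := a ++ [PySem.List.pyGetD arr (-1) 0 - PySem.List.pyGetD arr (-2) 0]
    if (PySem.Set.ofList a).length = 1 then -1
    else
      let m := (PySem.List.max? a (fun x => x)).getD 0
      if PySem.List.count a m = 1 then (((PySem.List.index? a m).getD 0 : Nat) : Int) else -1

-- ===== PORT B =====
-- the if/elif/else computing d in B's loop body
def ftMetric (arr : List Int) (n i : Int) : Int :=
  if i = 0 then PySem.List.pyGetD arr 0 0 - PySem.List.pyGetD arr 1 0
  else if i = n - 1 then PySem.List.pyGetD arr (n-1) 0 - PySem.List.pyGetD arr (n-2) 0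
  else 2 * PySem.List.pyGetD arr i 0 - PySem.List.pyGetD arr (i-1) 0 - PySem.List.pyGetD arr (i+1) 0

-- B's loop body: update (best, idx, cnt)
def ftStep (arr : List Int) (n : Int) (st : Option Int × Int × Int) (i : Int) :
    Option Int × Int × Int :=
  let d := ftMetric arr n i
  match st with
  | (none, _, _) => (some d, i, 1)
  | (some b, idx, cnt) =>
      if b < d then (some d, i, 1)
      else if d = b then (some b, idx, cnt + 1)
      else (some b, idx, cnt)

def first_tooth_alt (arr : List Int) : Int :=
  let n : Int := arr.length
  if n = 1 then 0
  else
    let s := (PySem.List.pyRange 0 n 1).foldl (ftStep arr n) (none, -1, 0)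
    if s.2.2 = 1 then s.2.1 else -1

-- ===== PRECONDITION & SPEC =====
-- Pre_ excludes only the empty list, on which A raises IndexError.
def Pre_first_tooth (arr : List Int) : Prop := arr ≠ []
instance (arr : List Int) : Decidable (Pre_first_tooth arr) := by
  unfold Pre_first_tooth; infer_instance
def pvWitness_first_tooth : List Int := [1, 3]

def Spec_first_tooth (arr : List Int) (out : Int) : Prop := out = first_tooth_alt arr
instance (arr : List Int) (out : Int) : Decidable (Spec_first_tooth arr out) := by
  unfold Spec_first_tooth; infer_instance

-- ===== CLAIM (what is proved, stated in full; the proofs are below) =====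
def Claim_equal_first_tooth : Prop :=
  ∀ (arr : List Int), Dom_first_tooth arr → Pre_first_tooth arr →
    Spec_first_tooth arr (first_tooth arr)

-- ===== LEMMAS AND PROOFS =====

-- the (best, first index, count) triple B's loop maintains, as a function of the prefix list
def ftSpecState (l : List Int) : Option Int × Int × Int :=
  match PySem.List.max? l (fun x => x) with
  | none => (none, -1, 0)
  | some m => (some m, (((PySem.List.index? l m).getD 0 : Nat) : Int),
               ((PySem.List.count l m : Nat) : Int))

theorem max?_id_append (l : List Int) (x : Int) :
    PySem.List.max? (l ++ [x]) (fun y => y) =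
      some (match PySem.List.max? l (fun y => y) with | none => x | some b => max b x) := by
  cases l with
  | nil => simp [PySem.List.max?]
  | cons h t =>
    rw [List.cons_append, PySem.List.max?_id_cons, PySem.List.max?_id_cons, List.foldl_append]
    simp

theorem step_spec_gen (l : List Int) (x i : Int) (hi : i = (l.length : Int)) :
    (match ftSpecState l with
     | (none, _, _) => (some x, i, (1 : Int))
     | (some b, idx, cnt) =>
        if b < x then (some x, i, 1) else if x = b then (some b, idx, cnt + 1)
        else (some b, idx, cnt))
    = ftSpecState (l ++ [x]) := by
  cases hm : PySem.List.max? l (fun y => y) with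
  | none =>
    have hl : l = [] := (PySem.List.max?_eq_none_iff _ _).1 hm
    subst hl
    simp only [List.length_nil, Nat.cast_zero] at hi
    subst hi
    simp [ftSpecState, PySem.List.max?, PySem.List.count_eq]
  | some b =>
    have hmem : b ∈ l := PySem.List.max?_mem hm
    have hmax : ∀ y ∈ l, y ≤ b := fun y hy => PySem.List.max?_isMax hm y hy
    have hspec : ftSpecState l = (some b, (((PySem.List.index? l b).getD 0 : Nat) : Int),
        ((PySem.List.count l b : Nat) : Int)) := by
      simp [ftSpecState, hm]
    rcases lt_trichotomy b x with hbx | hbx | hbx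
    · -- new max
      have hnot : x ∉ l := fun hxl => absurd (hmax x hxl) (by omega)
      have hidx := PySem.List.index?_append_singleton_self l x hnot
      have hcnt : PySem.List.count (l ++ [x]) x = 1 := by
        rw [PySem.List.count_eq, List.count_append]
        simp [List.count_eq_zero.2 hnot]
      have hR : ftSpecState (l ++ [x]) = (some x, (l.length : Int), 1) := by
        simp only [ftSpecState, max?_id_append, hm, max_eq_right (le_of_lt hbx)]
        rw [hidx, hcnt]
        simp
      rw [hspec, hR]
      simp [hi, hbx]
    · -- equal
      subst hbx
      have hidx := PySem.List.index?_append_of_mem [b] hmem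
      have hcnt : PySem.List.count (l ++ [b]) b = PySem.List.count l b + 1 := by
        rw [PySem.List.count_eq, PySem.List.count_eq, List.count_append]
        simp
      have hR : ftSpecState (l ++ [b]) = (some b, (((PySem.List.index? l b).getD 0 : Nat) : Int),
          ((PySem.List.count l b : Nat) : Int) + 1) := by
        simp only [ftSpecState, max?_id_append, hm, max_self]
        rw [hidx, hcnt]
        push_cast
        simp
      rw [hspec, hR]
      simp
    · -- smaller
      have hidx := PySem.List.index?_append_of_mem [x] hmem
      have hcnt : PySem.List.count (l ++ [x]) b = PySem.List.count l b := by
        rw [PySem.List.count_eq, PySem.List.count_eq, List.count_append]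
        simp [List.count_singleton]
        omega
      have hR : ftSpecState (l ++ [x]) = (some b, (((PySem.List.index? l b).getD 0 : Nat) : Int),
          ((PySem.List.count l b : Nat) : Int)) := by
        simp only [ftSpecState, max?_id_append, hm, max_eq_left (le_of_lt hbx)]
        rw [hidx, hcnt]
      rw [hspec, hR]
      have h1 : ¬ b < x := by omega
      have h2 : ¬ x = b := by omega
      simp [h1, h2]

theorem ft_step_spec (arr : List Int) (n : Int) (l : List Int) (i : Int)
    (hi : i = (l.length : Int)) :
    ftStep arr n (ftSpecState l) i = ftSpecState (l ++ [ftMetric arr n i]) := by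
  simpa [ftStep] using step_spec_gen l (ftMetric arr n i) i hi

theorem ft_fold_spec (arr : List Int) (n : Int) (k : Nat) :
    (PySem.List.pyRange 0 (k : Int) 1).foldl (ftStep arr n) (none, -1, 0)
      = ftSpecState ((PySem.List.pyRange 0 (k : Int) 1).map (ftMetric arr n)) := by
  induction k with
  | zero =>
    rw [PySem.List.pyRange_one_eq_nil (by omega)]
    simp [ftSpecState, PySem.List.max?]
  | succ k ih =>
    have hr : PySem.List.pyRange 0 ((k + 1 : Nat) : Int) 1
        = PySem.List.pyRange 0 (k : Int) 1 ++ [(k : Int)] := by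
      push_cast
      exact PySem.List.pyRange_one_succ_right (by omega)
    rw [hr, List.foldl_append, List.map_append, ih, List.foldl_cons, List.foldl_nil,
      List.map_cons, List.map_nil]
    exact ft_step_spec arr n _ (k : Int) (by simp [PySem.List.length_pyRange_one])

theorem ft_list_eq (arr : List Int) (h2 : 2 ≤ arr.length) :
    ((PySem.List.pyRange 1 ((arr.length : Int) - 1) 1).foldl
        (fun acc i => acc ++ [PySem.List.pyGetD arr i 0 - PySem.List.pyGetD arr (i-1) 0
                              + PySem.List.pyGetD arr i 0 - PySem.List.pyGetD arr (i+1) 0])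
        [PySem.List.pyGetD arr 0 0 - PySem.List.pyGetD arr 1 0])
      ++ [PySem.List.pyGetD arr (-1) 0 - PySem.List.pyGetD arr (-2) 0]
      = (PySem.List.pyRange 0 (arr.length : Int) 1).map (ftMetric arr (arr.length : Int)) := by
  have hn : (2 : Int) ≤ (arr.length : Int) := by exact_mod_cast h2
  rw [PySem.List.foldl_append_singleton_eq_map]
  have hsplit : PySem.List.pyRange 0 (arr.length : Int) 1
      = (0 : Int) :: (PySem.List.pyRange 1 ((arr.length : Int) - 1) 1 ++ [(arr.length : Int) - 1]) := by
    rw [PySem.List.pyRange_one_cons (by omega)]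
    congr 1
    have := PySem.List.pyRange_one_succ_right (a := 1) (b := (arr.length : Int) - 1) (by omega)
    rw [← this]
    congr 1
    omega
  rw [hsplit, List.map_cons, List.map_append, List.map_singleton]
  have h0 : ftMetric arr (arr.length : Int) 0
      = PySem.List.pyGetD arr 0 0 - PySem.List.pyGetD arr 1 0 := by
    simp [ftMetric]
  have hlast : ftMetric arr (arr.length : Int) ((arr.length : Int) - 1)
      = PySem.List.pyGetD arr (-1) 0 - PySem.List.pyGetD arr (-2) 0 := by
    rw [ftMetric, if_neg (by omega), if_pos rfl]
    rw [PySem.List.pyGetD_neg_ofNat arr 1 0 (by omega) (by omega),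
        PySem.List.pyGetD_neg_ofNat arr 2 0 (by omega) (by omega)]
    rw [PySem.List.pyGetD_eq_getElem arr (i := (arr.length : Int) - 1) 0 (by omega) (by omega),
        PySem.List.pyGetD_eq_getElem arr (i := (arr.length : Int) - 2) 0 (by omega) (by omega)]
    have e1 : ((arr.length : Int) - 1).toNat = arr.length - 1 := by omega
    have e2 : ((arr.length : Int) - 2).toNat = arr.length - 2 := by omega
    simp [e1, e2]
  have hmid : (PySem.List.pyRange 1 ((arr.length : Int) - 1) 1).map
        (fun i => PySem.List.pyGetD arr i 0 - PySem.List.pyGetD arr (i-1) 0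
                  + PySem.List.pyGetD arr i 0 - PySem.List.pyGetD arr (i+1) 0)
      = (PySem.List.pyRange 1 ((arr.length : Int) - 1) 1).map (ftMetric arr (arr.length : Int)) := by
    apply List.map_congr_left
    intro i hi
    rw [PySem.List.mem_pyRange_one] at hi
    rw [ftMetric, if_neg (by omega), if_neg (by omega)]
    ring
  rw [h0, hlast, hmid]
  simp

theorem ft_main (arr : List Int) (hpre : arr ≠ []) :
    first_tooth arr = first_tooth_alt arr := by
  by_cases h1 : arr.length = 1
  · simp [first_tooth, first_tooth_alt, h1]
  · have h2 : 2 ≤ arr.length := by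
      cases arr with
      | nil => exact absurd rfl hpre
      | cons x t => cases t with
        | nil => simp at h1
        | cons y u => simp
    have hne : ¬ ((arr.length : Int) = 1) := by exact_mod_cast h1
    rw [first_tooth, first_tooth_alt]
    simp only [if_neg hne]
    rw [ft_list_eq arr h2, ft_fold_spec arr (arr.length : Int) arr.length]
    set a := (PySem.List.pyRange 0 (arr.length : Int) 1).map (ftMetric arr (arr.length : Int))
      with ha
    have hlen : a.length = arr.length := by
      simp [ha, PySem.List.length_pyRange_one]
    have hane : a ≠ [] := by
      intro h; rw [h] at hlen; simp at hlen; omega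
    obtain ⟨m, hm⟩ : ∃ m, PySem.List.max? a (fun x => x) = some m := by
      cases hmx : PySem.List.max? a (fun x => x) with
      | none => exact absurd ((PySem.List.max?_eq_none_iff _ _).1 hmx) hane
      | some m => exact ⟨m, rfl⟩
    have hspec : ftSpecState a = (some m, (((PySem.List.index? a m).getD 0 : Nat) : Int),
        ((PySem.List.count a m : Nat) : Int)) := by
      simp [ftSpecState, hm]
    rw [hspec, hm]
    simp only [Option.getD_some]
    by_cases hset : (PySem.Set.ofList a).length = 1
    · obtain ⟨c, hc⟩ := List.length_eq_one_iff.1 hset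
      have hall : ∀ x ∈ a, x = c := by
        intro x hx
        have : x ∈ PySem.Set.ofList a := (PySem.Set.mem_ofList _ _).2 hx
        rw [hc] at this
        simpa using this
      have hmem : m ∈ a := PySem.List.max?_mem hm
      have hcount : PySem.List.count a m = a.length := by
        rw [PySem.List.count_eq]
        refine List.count_eq_length.2 ?_
        intro b hb
        rw [hall b hb, hall m hmem]
      have : ¬ ((PySem.List.count a m : Nat) : Int) = 1 := by
        rw [hcount, hlen]; exact_mod_cast by omega
      rw [if_pos hset, if_neg this]
    · rw [if_neg hset]
      by_cases hcnt : PySem.List.count a m = 1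
      · have : ((PySem.List.count a m : Nat) : Int) = 1 := by exact_mod_cast hcnt
        rw [if_pos hcnt, if_pos this]
      · have : ¬ ((PySem.List.count a m : Nat) : Int) = 1 := by exact_mod_cast hcnt
        rw [if_neg hcnt, if_neg this]

-- ===== VERDICT (by name: the statement is the Claim_ definition above) =====
theorem first_tooth_spec : Claim_equal_first_tooth := by
  intro arr _ hpre
  unfold Spec_first_tooth
  exact ft_main arr hpre
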